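-- pv_equiv track=rewrite | github.com/mliu01/transformer-project | classifier_models/LCPN_Hierarchical_Classification.py | initialize_paths_per_lvl
-- ===== SOURCE A (Python) =====
-- def initialize_paths_per_lvl(paths):
--     length = max([len(path) for path in paths])
--     paths_per_lvl = {}
--     for i in range(length):
--         added_paths = set()
--         paths_per_lvl[i] = []
--         for path in paths:
--             new_path = path[:i+1]
--             new_tuple = tuple(new_path)
--             if not (new_tuple in added_paths):
--                 added_paths.add(new_tuple)
--                 paths_per_lvl[i].append(new_path)
--
--     return paths_per_lvl
-- ===== SOURCE B (Python) =====
-- def initialize_paths_per_lvl(paths):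
--     length = max(len(path) for path in paths)
--     seen = [set() for _ in range(length)]
--     levels = [[] for _ in range(length)]
--     for path in paths:
--         prefix = []
--         for i in range(length):
--             if i < len(path):
--                 prefix = prefix + [path[i]]
--             t = tuple(prefix)
--             if t not in seen[i]:
--                 seen[i].add(t)
--                 levels[i].append(prefix)
--     return {i: lvl for i, lvl in enumerate(levels)}
-- ===== Notes on version B (the rewrite author's own statement) =====
-- stated objective: alternative
-- what changed: B makes one pass over the paths, extending each path's prefix incrementally and updating every level's (seen-set, output-list) cell as it goes, instead of A's level-outer loop that re-slices every path at every level.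
import Mathlib
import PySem

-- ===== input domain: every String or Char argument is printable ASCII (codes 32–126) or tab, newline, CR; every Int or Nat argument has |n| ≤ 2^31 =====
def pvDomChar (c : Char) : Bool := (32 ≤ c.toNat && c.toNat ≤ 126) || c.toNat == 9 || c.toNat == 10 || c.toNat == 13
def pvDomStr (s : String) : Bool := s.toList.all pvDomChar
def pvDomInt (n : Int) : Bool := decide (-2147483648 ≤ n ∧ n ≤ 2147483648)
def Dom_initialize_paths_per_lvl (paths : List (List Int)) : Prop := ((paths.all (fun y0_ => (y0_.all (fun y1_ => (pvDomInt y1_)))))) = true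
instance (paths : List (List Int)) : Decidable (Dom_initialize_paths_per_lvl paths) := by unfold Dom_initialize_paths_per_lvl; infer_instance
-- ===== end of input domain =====

-- B collects the per-level unique prefixes in ONE pass over the paths, extending each
-- path's prefix incrementally instead of re-slicing every path at every level (alternative decomposition).

-- ===== PORT A =====
-- body of A's inner loop at one level: state = (added_paths, paths_per_lvl[i])
def pvAStep (newPath : List Int) (st : PySem.Set (List Int) × List (List Int)) :
    PySem.Set (List Int) × List (List Int) :=
  if st.1.contains newPath then st else (st.1.add newPath, st.2 ++ [newPath])

-- A's inner 'for path in paths' loop at level i (builds added_paths and the list appended to paths_per_lvl[i])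
def pvALevel (paths : List (List Int)) (i : Int) : PySem.Set (List Int) × List (List Int) :=
  paths.foldl (fun st path => pvAStep (PySem.List.slice path none (some (i + 1))) st)
    (PySem.Set.empty, [])

def initialize_paths_per_lvl (paths : List (List Int)) : List (Int × List (List Int)) :=
  let length : Int := (PySem.List.max? (paths.map (fun p => PySem.List.len p)) (fun x => x)).getD 0
  ((PySem.List.pyRange 0 length 1).foldl
    (fun (d : PySem.Dict Int (List (List Int))) i => d.insert i (pvALevel paths i).2)
    PySem.Dict.empty).items

-- ===== PORT B =====
-- body of B's per-cell update (the 'if tuple(prefix) not in seen[i]' block)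
def pvBStep (pfx : List Int) (c : PySem.Set (List Int) × List (List Int)) :
    PySem.Set (List Int) × List (List Int) :=
  if c.1.contains pfx then c else (c.1.add pfx, c.2 ++ [pfx])

-- B's inner 'for i in range(length)' loop: walk the level cells, extending the prefix as it goes
def pvBPath (path : List Int) : Nat → List Int →
    List (PySem.Set (List Int) × List (List Int)) → List (PySem.Set (List Int) × List (List Int))
  | _, _, [] => []
  | i, pfx, c :: rest =>
    let pfx' := if h : i < path.length then pfx ++ [path[i]] else pfx
    pvBStep pfx' c :: pvBPath path (i + 1) pfx' rest

def initialize_paths_per_lvl_alt (paths : List (List Int)) : List (Int × List (List Int)) :=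
  let length : Int := (PySem.List.max? (paths.map (fun p => PySem.List.len p)) (fun x => x)).getD 0
  let cells := paths.foldl (fun cells path => pvBPath path 0 [] cells)
    (List.replicate length.toNat (PySem.Set.empty, []))
  (PySem.List.enumerate cells).map (fun ic => (ic.1, ic.2.2))

-- ===== PRECONDITION & SPEC =====
-- Pre_ excludes only the empty list of paths, where Python A raises ValueError (max() of an empty sequence); B raises there too.
def Pre_initialize_paths_per_lvl (paths : List (List Int)) : Prop := paths ≠ []
instance (paths : List (List Int)) : Decidable (Pre_initialize_paths_per_lvl paths) := by
  unfold Pre_initialize_paths_per_lvl; infer_instance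

def pvWitness_initialize_paths_per_lvl : List (List Int) := [[1, 2], [1, 3], []]

def Spec_initialize_paths_per_lvl (paths : List (List Int)) (out : List (Int × List (List Int))) : Prop := out = initialize_paths_per_lvl_alt paths
instance (paths : List (List Int)) (out : List (Int × List (List Int))) : Decidable (Spec_initialize_paths_per_lvl paths out) := by unfold Spec_initialize_paths_per_lvl; infer_instance

-- ===== CLAIM (what is proved, stated in full; the proofs are below) =====
def Claim_equal_initialize_paths_per_lvl : Prop := ∀ (paths : List (List Int)), Dom_initialize_paths_per_lvl paths → Pre_initialize_paths_per_lvl paths → Spec_initialize_paths_per_lvl paths (initialize_paths_per_lvl paths)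

-- ===== LEMMAS AND PROOFS =====

-- the per-level fold both programs perform, in canonical form (take-prefixes)
def pvLevel (paths : List (List Int)) (j : Nat) : PySem.Set (List Int) × List (List Int) :=
  paths.foldl (fun c p => pvBStep (p.take (j + 1)) c) (PySem.Set.empty, [])

-- A's level fold is the canonical fold (slice path[:i+1] at i = ↑j is take (j+1))
theorem pvALevel_eq (paths : List (List Int)) (j : Nat) :
    pvALevel paths (j : Int) = pvLevel paths j := by
  unfold pvALevel pvLevel
  have hstep : (fun (st : PySem.Set (List Int) × List (List Int)) (path : List Int) =>
      pvAStep (PySem.List.slice path none (some ((j : Int) + 1))) st)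
      = (fun c p => pvBStep (p.take (j + 1)) c) := by
    funext st p
    have hc : ((j : Int) + 1) = ((j + 1 : Nat) : Int) := by push_cast; ring
    rw [hc, PySem.List.slice_to_natCast]
    rfl
  rw [hstep]

-- B's inner loop, cellwise: starting from prefix = path.take i at cell index i,
-- the j-th cell receives the prefix path.take (i + 1 + j)
theorem pvBPath_eq (path : List Int) (cells : List (PySem.Set (List Int) × List (List Int))) :
    ∀ (i : Nat), pvBPath path i (path.take i) cells
      = cells.mapIdx (fun j c => pvBStep (path.take (i + 1 + j)) c) := by
  induction cells with
  | nil => intro i; simp [pvBPath]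
  | cons c rest ih =>
    intro i
    have hpfx : (if _ : i < path.length then path.take i ++ [path[i]] else path.take i)
        = path.take (i + 1) := by
      split
      · next h => rw [List.take_add_one, List.getElem?_eq_getElem h]; rfl
      · next h => rw [List.take_of_length_le (by omega), List.take_of_length_le (by omega)]
    simp only [pvBPath, hpfx, List.mapIdx_cons]
    have h2 : (fun (j : Nat) (c' : PySem.Set (List Int) × List (List Int)) =>
        pvBStep (List.take (i + 1 + 1 + j) path) c')
        = (fun (j : Nat) c' => pvBStep (List.take (i + 1 + (j + 1)) path) c') := by
      funext j c'
      have harith : i + 1 + 1 + j = i + 1 + (j + 1) := by omega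
      rw [harith]
    rw [ih (i + 1), h2]

-- B's inner loop started at prefix [] / index 0
theorem pvBPath_zero (path : List Int) (cells : List (PySem.Set (List Int) × List (List Int))) :
    pvBPath path 0 [] cells = cells.mapIdx (fun j c => pvBStep (path.take (j + 1)) c) := by
  have h := pvBPath_eq path cells 0
  simp only [List.take_zero] at h
  rw [h]
  congr 1
  funext j c
  have : 0 + 1 + j = j + 1 := by omega
  rw [this]

-- mapIdx with the identity function
theorem pvMapIdx_id {C : Type} (l : List C) : l.mapIdx (fun _ c => c) = l := by
  induction l using List.reverseRecOn <;> simp_all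

-- a fold over paths of a pointwise (mapIdx) cell update = independent per-cell folds
theorem pvFoldl_mapIdx {P C : Type} (g : P → Nat → C → C) (ps : List P) :
    ∀ (cells : List C),
      ps.foldl (fun cs p => cs.mapIdx (fun j c => g p j c)) cells
        = cells.mapIdx (fun j c => ps.foldl (fun c p => g p j c) c) := by
  induction ps with
  | nil => intro cells; simp only [List.foldl_nil]; exact (pvMapIdx_id cells).symm
  | cons p rest ih =>
    intro cells
    simp only [List.foldl_cons]
    rw [ih, List.mapIdx_mapIdx]
    rfl

-- mapIdx over a constant (replicate) list enumerates the index
theorem pvMapIdx_replicate {C D : Type} (n : Nat) (a : C) (f : Nat → C → D) :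
    (List.replicate n a).mapIdx f = (List.range n).map (fun j => f j a) := by
  apply List.ext_getElem
  · simp
  · intro k h1 h2
    simp [List.getElem_mapIdx]

-- enumerate is index-value pairing
theorem pvGetElem?_enumerate {α : Type} (xs : List α) (s : Int) (k : Nat) (hk : k < xs.length) :
    (PySem.List.enumerate xs s)[k]? = some (s + k, xs[k]) := by
  induction xs generalizing s k with
  | nil => simp at hk
  | cons x t ih =>
    rw [PySem.List.enumerate_cons]
    cases k with
    | zero => simp
    | succ m =>
      have hm : m < t.length := by simpa using hk
      rw [List.getElem?_cons_succ, ih (s + 1) m hm]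
      simp only [List.getElem_cons_succ, Option.some.injEq, Prod.mk.injEq]
      constructor
      · push_cast; ring
      · trivial

-- pyRange from 0 with a Nat bound is the cast of List.range
theorem pvPyRange_zero (n : Nat) :
    PySem.List.pyRange 0 (n : Int) 1 = (List.range n).map (fun (k : Nat) => (k : Int)) := by
  rw [PySem.List.pyRange_one]; simp

-- A's whole dict loop, in canonical form
theorem pvA_items (paths : List (List Int)) (n : Nat) :
    ((PySem.List.pyRange 0 (n : Int) 1).foldl
        (fun (d : PySem.Dict Int (List (List Int))) i => d.insert i (pvALevel paths i).2)
        PySem.Dict.empty).items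
      = (List.range n).map (fun (j : Nat) => ((j : Int), (pvLevel paths j).2)) := by
  rw [pvPyRange_zero, List.foldl_map]
  rw [PySem.Dict.items_foldl_insert_fresh (List.range n) (fun j => (j : Int))
      (fun j => (pvALevel paths (j : Int)).2) PySem.Dict.empty
      (fun a _ => PySem.Dict.contains_empty _)
      ((List.nodup_range).map (fun a b h => by exact_mod_cast h))]
  simp only [PySem.Dict.empty]
  rw [List.nil_append]
  apply List.map_congr_left
  intro j _
  rw [pvALevel_eq]

-- B's whole loop, in canonical form
theorem pvB_cells (paths : List (List Int)) (n : Nat) :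
    paths.foldl (fun cells path => pvBPath path 0 [] cells)
        (List.replicate n (PySem.Set.empty, []))
      = (List.range n).map (fun j => pvLevel paths j) := by
  have hfn : (fun (cells : List (PySem.Set (List Int) × List (List Int))) (path : List Int) =>
      pvBPath path 0 [] cells)
      = (fun cells path => cells.mapIdx (fun j c => pvBStep (path.take (j + 1)) c)) := by
    funext cells path
    exact pvBPath_zero path cells
  rw [hfn, pvFoldl_mapIdx (fun p j c => pvBStep (p.take (j + 1)) c) paths,
      pvMapIdx_replicate]
  rfl

-- ===== VERDICT (by name: the statement is the Claim_ definition above) =====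
theorem initialize_paths_per_lvl_spec : Claim_equal_initialize_paths_per_lvl := by
  intro paths _ hpre
  unfold Spec_initialize_paths_per_lvl
  -- the common 'length' is some nonnegative integer m = ↑n
  obtain ⟨m, hm⟩ : ∃ m, PySem.List.max? (paths.map (fun p => PySem.List.len p)) (fun x => x) = some m := by
    rcases h : PySem.List.max? (paths.map (fun p => PySem.List.len p)) (fun x => x) with _ | m
    · rw [PySem.List.max?_eq_none_iff] at h
      exact absurd (List.map_eq_nil_iff.mp h) hpre
    · exact ⟨m, rfl⟩
  have hmem := PySem.List.max?_mem hm
  have hm0 : 0 ≤ m := by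
    rcases List.mem_map.mp hmem with ⟨p, _, hp⟩
    simp only [PySem.List.len] at hp
    omega
  simp only [initialize_paths_per_lvl, initialize_paths_per_lvl_alt, hm, Option.getD_some]
  have hcast : m = ((m.toNat : Nat) : Int) := by omega
  rw [hcast]
  simp only [Int.toNat_natCast]
  rw [pvA_items paths m.toNat, pvB_cells paths m.toNat]
  apply List.ext_getElem
  · simp [PySem.List.length_enumerate]
  · intro k h1 h2
    have hk : k < ((List.range m.toNat).map (fun j => pvLevel paths j)).length := by
      simp at h1 ⊢; omega
    have he := pvGetElem?_enumerate ((List.range m.toNat).map (fun j => pvLevel paths j)) 0 k hk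
    have h1' : k < (PySem.List.enumerate ((List.range m.toNat).map (fun j => pvLevel paths j)) 0).length := by
      rw [PySem.List.length_enumerate]; exact hk
    have helem : (PySem.List.enumerate ((List.range m.toNat).map (fun j => pvLevel paths j)) 0)[k]'h1'
        = (0 + (k : Int), ((List.range m.toNat).map (fun j => pvLevel paths j))[k]'hk) := by
      have hge := List.getElem?_eq_getElem h1'
      rw [he] at hge
      exact (Option.some_inj.mp hge).symm
    rw [List.getElem_map, List.getElem_map, helem]
    simp
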